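-- pv_equiv track=rewrite | github.com/Eunyeol-Lucas/algorithm | kakao/2.py | bfs
-- ===== SOURCE A (Python) =====
-- from collections import deque
--
-- def bfs(q1, q2):
--     q = deque()
--     q.append((q1, q2, 0))
--     opp = len(q1) + len(q2)
--     min_v = int(1e9)
--     while q:
--         q3, q4, cnt = q.popleft()
--         if q3 and q4:
--             if sum(q3) == sum(q4):
--                 if min_v > cnt:
--                     min_v = cnt
--             if cnt > opp:
--                 break
--             if cnt < min_v:
--                 q5 = q3[:]
--                 q6 = q4[:]
--                 q6.append(q5.pop(0))
--                 q.append((q5, q6, cnt + 1))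
--                 q7 = q3[:]
--                 q8 = q4[:]
--                 q7.append(q8.pop(0))
--                 q.append((q7, q8, cnt + 1))
--     return min_v
-- ===== SOURCE B (Python) =====
-- def bfs(q1, q2):
--     # level-synchronous BFS over DEDUPLICATED states: at most cnt+1 distinct
--     # states per level instead of 2**cnt queue entries
--     min_v = int(1e9)
--     opp = len(q1) + len(q2)
--     level = [(list(q1), list(q2))]
--     cnt = 0
--     while level:
--         nxt = []
--         for q3, q4 in level:
--             if q3 and q4:
--                 if sum(q3) == sum(q4) and min_v > cnt:
--                     min_v = cnt
--                 if cnt > opp: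
--                     return min_v
--                 if cnt < min_v:
--                     c1 = (q3[1:], q4 + [q3[0]])
--                     c2 = (q3 + [q4[0]], q4[1:])
--                     if c1 not in nxt:
--                         nxt.append(c1)
--                     if c2 not in nxt:
--                         nxt.append(c2)
--         level = nxt
--         cnt += 1
--     return min_v
-- ===== Notes on version B (the rewrite author's own statement) =====
-- stated objective: alternative
-- what changed: A's breadth-first search pushes every move sequence as a separate deque entry (up to 2^cnt entries per level); B runs the BFS level-synchronously and deduplicates each level's states, so a level holds at most cnt+1 distinct (queue1, queue2) pairs. Intended as faster (a timing run saw A time out at n=16 where B returned) but no ratio could be measured, so no speed is claimed.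
import Mathlib
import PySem

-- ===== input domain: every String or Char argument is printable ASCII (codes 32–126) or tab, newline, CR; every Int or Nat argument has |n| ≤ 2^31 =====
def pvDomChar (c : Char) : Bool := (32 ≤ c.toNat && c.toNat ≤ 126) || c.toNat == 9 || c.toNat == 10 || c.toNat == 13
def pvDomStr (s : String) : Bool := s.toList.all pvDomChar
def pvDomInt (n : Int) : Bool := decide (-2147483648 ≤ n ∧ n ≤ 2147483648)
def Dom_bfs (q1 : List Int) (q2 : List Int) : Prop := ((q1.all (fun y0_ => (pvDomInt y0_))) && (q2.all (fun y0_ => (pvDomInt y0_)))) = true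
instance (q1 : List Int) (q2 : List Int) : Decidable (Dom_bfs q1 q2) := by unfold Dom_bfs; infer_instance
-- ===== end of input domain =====

-- B replaces A's BFS over an explicit deque of duplicated queue copies by a
-- level-synchronous BFS that deduplicates the states of each level (objective: alternative;
-- intended as faster — a timing run saw A time out at n=16 where B returned, but could
-- not measure a ratio, so no speed is claimed).

-- ===== PORT A =====
-- literal port of A's while loop: FIFO queue of (q3, q4, cnt) triples; fuel 2^(n+2)
-- bounds the number of pops (levels reach at most n+1 and at most double in size).
def runA : List (List Int × List Int × Int) → Int → Int → Nat → Int
  | _, _, m, 0 => m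
  | [], _, m, _ + 1 => m
  | (q3, q4, cnt) :: rest, opp, m, f + 1 =>
    match q3, q4 with
    | a :: q3t, b :: q4t =>
      let m1 := if (a :: q3t).sum = (b :: q4t).sum ∧ cnt < m then cnt else m
      if opp < cnt then m1
      else if cnt < m1 then
        runA (rest ++ [(q3t, (b :: q4t) ++ [a], cnt + 1), ((a :: q3t) ++ [b], q4t, cnt + 1)]) opp m1 f
      else runA rest opp m1 f
    | _, _ => runA rest opp m f

def bfs (q1 : List Int) (q2 : List Int) : Int :=
  runA [(q1, q2, 0)] ((q1.length : Int) + (q2.length : Int)) 1000000000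
    (2 ^ (q1.length + q2.length + 2))

-- ===== PORT B =====
-- Source B appends a child to nxt only if it is not already there
def addIfNew (nxt : List (List Int × List Int)) (c : List Int × List Int) :
    List (List Int × List Int) :=
  if c ∈ nxt then nxt else nxt ++ [c]

-- the for-loop over one level: either an early return (inl) or (min_v, next level) (inr)
def procB : List (List Int × List Int) → Int → Int → Int → List (List Int × List Int) →
    Sum Int (Int × List (List Int × List Int))
  | [], _, _, m, nxt => .inr (m, nxt)
  | (q3, q4) :: rest, opp, cnt, m, nxt =>
    match q3, q4 with
    | a :: q3t, b :: q4t =>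
      let m1 := if (a :: q3t).sum = (b :: q4t).sum ∧ cnt < m then cnt else m
      if opp < cnt then .inl m1
      else if cnt < m1 then
        procB rest opp cnt m1
          (addIfNew (addIfNew nxt (q3t, (b :: q4t) ++ [a])) ((a :: q3t) ++ [b], q4t))
      else procB rest opp cnt m1 nxt
    | _, _ => procB rest opp cnt m nxt

-- the while loop over levels; fuel n+3 bounds the number of levels
def runB : Nat → List (List Int × List Int) → Int → Int → Int → Int
  | 0, _, _, _, m => m
  | f + 1, level, opp, cnt, m =>
    if level = [] then m
    else
      match procB level opp cnt m [] with
      | .inl r => r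
      | .inr (m', nxt) => runB f nxt opp (cnt + 1) m'

def bfs_alt (q1 : List Int) (q2 : List Int) : Int :=
  runB (q1.length + q2.length + 3) [(q1, q2)] ((q1.length : Int) + (q2.length : Int)) 0
    1000000000

-- ===== PRECONDITION & SPEC =====
def Spec_bfs (q1 : List Int) (q2 : List Int) (out : Int) : Prop := out = bfs_alt q1 q2
instance (q1 : List Int) (q2 : List Int) (out : Int) : Decidable (Spec_bfs q1 q2 out) := by unfold Spec_bfs; infer_instance

-- ===== CLAIM (what is proved, stated in full; the proofs are below) =====
def Claim_equal_bfs : Prop := ∀ (q1 : List Int) (q2 : List Int), Dom_bfs q1 q2 → Spec_bfs q1 q2 (bfs q1 q2)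

-- ===== LEMMAS AND PROOFS =====

-- dedup keeping first occurrences, relative to an already-seen set
def ddRel : List (List Int × List Int) → List (List Int × List Int) →
    List (List Int × List Int)
  | _, [] => []
  | seen, x :: t => if x ∈ seen then ddRel seen t else x :: ddRel (x :: seen) t

lemma ddRel_nil {l : List (List Int × List Int)} (h : ddRel [] l = []) : l = [] := by
  cases l with
  | nil => rfl
  | cons x t => simp [ddRel] at h

lemma ddRel_append (seen l : List (List Int × List Int)) (c : List Int × List Int) :
    ddRel seen (l ++ [c]) =
      if c ∈ seen ∨ c ∈ ddRel seen l then ddRel seen l else ddRel seen l ++ [c] := by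
  induction l generalizing seen with
  | nil => simp [ddRel]
  | cons x t ih =>
    by_cases hx : x ∈ seen
    · simpa [ddRel, hx] using ih seen
    · have := ih (x :: seen)
      simp only [List.cons_append, ddRel, if_neg hx, this, List.mem_cons]
      by_cases h1 : c ∈ seen <;> by_cases h2 : c = x <;>
        by_cases h3 : c ∈ ddRel (x :: seen) t <;> simp [h1, h2, h3]

lemma ddRel_append_addIfNew (l : List (List Int × List Int)) (c : List Int × List Int) :
    ddRel [] (l ++ [c]) = addIfNew (ddRel [] l) c := by
  simp [ddRel_append, addIfNew]

lemma mem_addIfNew_self (l : List (List Int × List Int)) (c : List Int × List Int) :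
    c ∈ addIfNew l c := by
  unfold addIfNew; split_ifs with h
  · exact h
  · simp

lemma mem_addIfNew_of_mem {l : List (List Int × List Int)} {a : List Int × List Int}
    (c : List Int × List Int) (h : a ∈ l) : a ∈ addIfNew l c := by
  unfold addIfNew; split_ifs <;> simp [h]


lemma runA_dead (q3 q4 : List Int) (hx : q3 = [] ∨ q4 = []) (cnt : Int)
    (rest : List (List Int × List Int × Int)) (opp m : Int) (f : Nat) :
    runA ((q3, q4, cnt) :: rest) opp m (f + 1) = runA rest opp m f := by
  rcases hx with rfl | rfl
  · simp [runA]
  · cases q3 <;> simp [runA]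

lemma runA_alive (a : Int) (q3t : List Int) (b : Int) (q4t : List Int) (cnt : Int)
    (rest : List (List Int × List Int × Int)) (opp m : Int) (f : Nat) :
    runA ((a :: q3t, b :: q4t, cnt) :: rest) opp m (f + 1) =
      (let m1 := if (a :: q3t).sum = (b :: q4t).sum ∧ cnt < m then cnt else m
       if opp < cnt then m1
       else if cnt < m1 then
         runA (rest ++ [(q3t, (b :: q4t) ++ [a], cnt + 1), ((a :: q3t) ++ [b], q4t, cnt + 1)]) opp m1 f
       else runA rest opp m1 f) := rfl

lemma procB_dead (q3 q4 : List Int) (hx : q3 = [] ∨ q4 = []) (rest : List (List Int × List Int))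
    (opp cnt m : Int) (nxt : List (List Int × List Int)) :
    procB ((q3, q4) :: rest) opp cnt m nxt = procB rest opp cnt m nxt := by
  rcases hx with rfl | rfl
  · simp [procB]
  · cases q3 <;> simp [procB]

lemma procB_alive (a : Int) (q3t : List Int) (b : Int) (q4t : List Int)
    (rest : List (List Int × List Int)) (opp cnt m : Int) (nxt : List (List Int × List Int)) :
    procB ((a :: q3t, b :: q4t) :: rest) opp cnt m nxt =
      (let m1 := if (a :: q3t).sum = (b :: q4t).sum ∧ cnt < m then cnt else m
       if opp < cnt then .inl m1
       else if cnt < m1 then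
         procB rest opp cnt m1
           (addIfNew (addIfNew nxt (q3t, (b :: q4t) ++ [a])) ((a :: q3t) ++ [b], q4t))
       else procB rest opp cnt m1 nxt) := rfl

lemma ddRel_cons_mem {seen : List (List Int × List Int)} {x : List Int × List Int}
    (h : x ∈ seen) (t : List (List Int × List Int)) : ddRel seen (x :: t) = ddRel seen t := by
  simp [ddRel, h]

lemma ddRel_cons_not_mem {seen : List (List Int × List Int)} {x : List Int × List Int}
    (h : x ∉ seen) (t : List (List Int × List Int)) :
    ddRel seen (x :: t) = x :: ddRel (x :: seen) t := by
  simp [ddRel, h]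

-- (cnt = n+1-k) followed by the partially built next level `lnext`; B is about to process
-- the deduplicated tail `ddRel seen la` with accumulator `nxt = ddRel [] lnext`.
lemma runB_cons (f : Nat) (x : List Int × List Int) (t : List (List Int × List Int))
    (opp cnt m : Int) :
    runB (f + 1) (x :: t) opp cnt m =
      (match procB (x :: t) opp cnt m [] with
       | .inl r => r
       | .inr p => runB f p.2 opp (cnt + 1) p.1) := by
  simp only [runB]
  rw [if_neg (by simp)]
  cases h : procB (x :: t) opp cnt m [] with
  | inl r => rfl
  | inr p => rfl

-- the simulation invariant: A's queue holds the unprocessed tail `la` of the current level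
lemma main (n : Nat) : ∀ (k : Nat) (la lnext seen nxt : List (List Int × List Int))
    (m : Int) (fa fB : Nat),
    (k = 0 → lnext = []) →
    (∀ q3 q4, (q3, q4) ∈ seen → q3 ≠ [] → q4 ≠ [] → q3.sum = q4.sum →
      m ≤ (n : Int) + 1 - (k : Int)) →
    (∀ q3 q4, (q3, q4) ∈ seen → q3 ≠ [] → q4 ≠ [] → k ≠ 0) →
    (∀ a q3t b q4t, (a :: q3t, b :: q4t) ∈ seen → (n : Int) + 1 - (k : Int) < m →
      (q3t, (b :: q4t) ++ [a]) ∈ nxt ∧ ((a :: q3t) ++ [b], q4t) ∈ nxt) →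
    (nxt = ddRel [] lnext) →
    (la.length * (2 ^ (k + 1) - 1) + lnext.length * (2 ^ k - 1) ≤ fa) →
    (k + 1 ≤ fB) →
    runA (la.map (fun s => (s.1, s.2, (n : Int) + 1 - (k : Int))) ++
          lnext.map (fun s => (s.1, s.2, (n : Int) + 2 - (k : Int)))) (n : Int) m fa
      = (match procB (ddRel seen la) (n : Int) ((n : Int) + 1 - (k : Int)) m nxt with
         | .inl r => r
         | .inr p => runB fB p.2 (n : Int) ((n : Int) + 2 - (k : Int)) p.1) := by
  intro k
  induction k with
  | zero =>
    intro la
    induction la with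
    | nil =>
      intro lnext seen nxt m fa fB h0 I2 I3 I4 I1 HF HFB
      have hl : lnext = [] := h0 rfl
      subst hl
      have hx : nxt = [] := by simpa [ddRel] using I1
      subst hx
      simp only [List.map_nil, List.append_nil, ddRel]
      cases fa <;> cases fB <;> simp [runA, runB, procB]
    | cons x la' ih =>
      intro lnext seen nxt m fa fB h0 I2 I3 I4 I1 HF HFB
      have hl : lnext = [] := h0 rfl
      subst hl
      obtain ⟨q3, q4⟩ := x
      have hfa : 1 ≤ fa := by simp at HF; omega
      obtain ⟨f, rfl⟩ : ∃ f, fa = f + 1 := ⟨fa - 1, by omega⟩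
      simp only [Nat.cast_zero, sub_zero, List.map_cons, List.map_nil, List.append_nil,
        List.cons_append] at *
      by_cases hdead : q3 = [] ∨ q4 = []
      · rw [runA_dead _ _ hdead]
        by_cases hs : (q3, q4) ∈ seen
        · rw [ddRel_cons_mem hs]
          have := ih [] seen nxt m f fB (fun _ => rfl) I2 I3 I4 I1 (by simp at HF ⊢; omega) HFB
          simpa using this
        · rw [ddRel_cons_not_mem hs, procB_dead _ _ hdead]
          have := ih [] ((q3, q4) :: seen) nxt m f fB (fun _ => rfl)
            (by intro p q hm h1 h2 h3
                rcases List.mem_cons.1 hm with he | hm'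
                · cases he; rcases hdead with h | h
                  · exact absurd h h1
                  · exact absurd h h2
                · exact I2 p q hm' h1 h2 h3)
            (by intro p q hm h1 h2
                rcases List.mem_cons.1 hm with he | hm'
                · cases he; rcases hdead with h | h
                  · exact absurd h h1
                  · exact absurd h h2
                · exact I3 p q hm' h1 h2)
            (by intro a q3t b q4t hm hlt
                rcases List.mem_cons.1 hm with he | hm'
                · cases he; rcases hdead with h | h <;> simp at h
                · exact I4 a q3t b q4t hm' hlt)
            I1 (by simp at HF ⊢; omega) HFB
          simpa using this
      · obtain ⟨a, q3t, rfl⟩ : ∃ a q3t, q3 = a :: q3t := by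
          cases q3 with
          | nil => exact absurd (Or.inl rfl) hdead
          | cons a t => exact ⟨a, t, rfl⟩
        obtain ⟨b, q4t, rfl⟩ : ∃ b q4t, q4 = b :: q4t := by
          cases q4 with
          | nil => exact absurd (Or.inr rfl) hdead
          | cons b t => exact ⟨b, t, rfl⟩
        by_cases hs : ((a :: q3t, b :: q4t)) ∈ seen
        · exact absurd rfl (I3 (a :: q3t) (b :: q4t) hs (by simp) (by simp))
        · rw [ddRel_cons_not_mem hs, runA_alive, procB_alive]
          have hgt : (n : Int) < (n : Int) + 1 := by omega
          simp only [if_pos hgt]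
  | succ k ihk =>
    intro la
    induction la with
    | nil =>
      intro lnext seen nxt m fa fB h0 I2 I3 I4 I1 HF HFB
      simp only [ddRel, List.map_nil, List.nil_append, procB]
      obtain ⟨fB', rfl⟩ : ∃ fB', fB = fB' + 1 := ⟨fB - 1, by omega⟩
      by_cases hn : nxt = []
      · subst hn
        have hln : lnext = [] := ddRel_nil I1.symm
        subst hln
        cases fa <;> simp [runA, runB]
      · obtain ⟨x, t, rfl⟩ : ∃ x t, nxt = x :: t := by
          cases nxt with
          | nil => exact absurd rfl hn
          | cons x t => exact ⟨x, t, rfl⟩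
        have hcast : (n : Int) + 2 - ((k + 1 : Nat) : Int) = (n : Int) + 1 - (k : Int) := by
          push_cast; ring
        have hcast2 : (n : Int) + 1 - (k : Int) + 1 = (n : Int) + 2 - (k : Int) := by ring
        rw [runB_cons, hcast, hcast2]
        have := ihk lnext [] [] [] m fa fB' (fun _ => rfl)
          (by intro p q hm; simp at hm)
          (by intro p q hm; simp at hm)
          (by intro a q3t b q4t hm; simp at hm)
          (by simp [ddRel])
          (by simp at HF ⊢; omega)
          (by omega)
        simp only [List.map_nil, List.append_nil] at this
        rw [this, ← I1]
    | cons x la' ihla =>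
      intro lnext seen nxt m fa fB h0 I2 I3 I4 I1 HF HFB
      obtain ⟨q3, q4⟩ := x
      have hT : 2 ^ (k + 1 + 1) = 2 * 2 ^ (k + 1) := by rw [pow_succ]; ring
      have he : 1 ≤ 2 ^ (k + 1) := Nat.one_le_two_pow
      simp only [List.length_cons] at HF
      rw [Nat.add_mul] at HF
      have hfa : 1 ≤ fa := by omega
      obtain ⟨f, rfl⟩ : ∃ f, fa = f + 1 := ⟨fa - 1, by omega⟩
      simp only [List.map_cons, List.cons_append] at *
      by_cases hdead : q3 = [] ∨ q4 = []
      · rw [runA_dead _ _ hdead]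
        by_cases hs : (q3, q4) ∈ seen
        · rw [ddRel_cons_mem hs]
          exact ihla lnext seen nxt m f fB h0 I2 I3 I4 I1 (by omega) HFB
        · rw [ddRel_cons_not_mem hs, procB_dead _ _ hdead]
          exact ihla lnext ((q3, q4) :: seen) nxt m f fB h0
            (by intro p q hm h1 h2 h3
                rcases List.mem_cons.1 hm with he | hm'
                · cases he; rcases hdead with h | h
                  · exact absurd h h1
                  · exact absurd h h2
                · exact I2 p q hm' h1 h2 h3)
            (by intro p q hm h1 h2
                rcases List.mem_cons.1 hm with he | hm'
                · cases he; rcases hdead with h | h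
                  · exact absurd h h1
                  · exact absurd h h2
                · exact I3 p q hm' h1 h2)
            (by intro a q3t b q4t hm hlt
                rcases List.mem_cons.1 hm with he | hm'
                · cases he; rcases hdead with h | h <;> simp at h
                · exact I4 a q3t b q4t hm' hlt)
            I1 (by omega) HFB
      · obtain ⟨a, q3t, rfl⟩ : ∃ a q3t, q3 = a :: q3t := by
          cases q3 with
          | nil => exact absurd (Or.inl rfl) hdead
          | cons a t => exact ⟨a, t, rfl⟩
        obtain ⟨b, q4t, rfl⟩ : ∃ b q4t, q4 = b :: q4t := by
          cases q4 with
          | nil => exact absurd (Or.inr rfl) hdead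
          | cons b t => exact ⟨b, t, rfl⟩
        have hngt : ¬ ((n : Int) < (n : Int) + 1 - ((k + 1 : Nat) : Int)) := by push_cast; omega
        set cnt : Int := (n : Int) + 1 - ((k + 1 : Nat) : Int) with hcnt
        set m1 : Int := if (a :: q3t).sum = (b :: q4t).sum ∧ cnt < m then cnt else m with hm1
        have hm1le : m1 ≤ m := by
          rw [hm1]
          split_ifs with h
          · exact le_of_lt h.2
          · exact le_refl m
        have hm1eq : (a :: q3t).sum = (b :: q4t).sum → m1 ≤ cnt := by
          intro hsum
          rw [hm1]
          split_ifs with h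
          · exact le_refl cnt
          · rw [not_and] at h; exact not_lt.1 (h hsum)
        have hcnt1 : cnt + 1 = (n : Int) + 2 - ((k + 1 : Nat) : Int) := by rw [hcnt]; ring
        have hq : ∀ (Q : List (List Int × List Int × Int)),
            (List.map (fun s => (s.1, s.2, cnt)) la' ++
              List.map (fun s => (s.1, s.2, (n : Int) + 2 - ((k + 1 : Nat) : Int))) lnext) ++
              [(q3t, b :: (q4t ++ [a]), cnt + 1), (a :: (q3t ++ [b]), q4t, cnt + 1)] =
            List.map (fun s => (s.1, s.2, cnt)) la' ++
              List.map (fun s => (s.1, s.2, (n : Int) + 2 - ((k + 1 : Nat) : Int)))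
                (lnext ++ [(q3t, b :: (q4t ++ [a])), (a :: (q3t ++ [b]), q4t)]) := by
          intro _
          simp [List.map_append, hcnt1]
        by_cases hs : ((a :: q3t, b :: q4t)) ∈ seen
        · have hmm : m1 = m := by
            rw [hm1]; split_ifs with h
            · exact absurd h.2 (not_lt.2 (I2 _ _ hs (by simp) (by simp) h.1))
            · rfl
          rw [ddRel_cons_mem hs, runA_alive]
          simp only [List.cons_append, if_neg hngt]
          rw [← hm1, hmm]
          by_cases hexp : cnt < m
          · rw [if_pos hexp]
            have hch := I4 a q3t b q4t hs hexp
            rw [hq []]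
            refine ihla (lnext ++ [(q3t, b :: (q4t ++ [a])), (a :: (q3t ++ [b]), q4t)])
              seen nxt m f fB (by intro h; exact absurd h (Nat.succ_ne_zero k)) I2 I3 I4 ?_ ?_ HFB
            · rw [show lnext ++ [(q3t, b :: (q4t ++ [a])), (a :: (q3t ++ [b]), q4t)]
                  = (lnext ++ [(q3t, b :: (q4t ++ [a]))]) ++ [(a :: (q3t ++ [b]), q4t)] by simp,
                ddRel_append_addIfNew, ddRel_append_addIfNew, ← I1]
              unfold addIfNew
              rw [if_pos hch.1, if_pos hch.2]
            · simp only [List.length_append, List.length_cons, List.length_nil]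
              rw [Nat.add_mul]
              omega
          · rw [if_neg hexp]
            exact ihla lnext seen nxt m f fB h0 I2 I3 I4 I1 (by omega) HFB
        · rw [ddRel_cons_not_mem hs, runA_alive, procB_alive]
          simp only [List.cons_append, if_neg hngt]
          rw [← hm1]
          have hI2' : ∀ p q, (p, q) ∈ (a :: q3t, b :: q4t) :: seen → p ≠ [] → q ≠ [] →
              p.sum = q.sum → m1 ≤ cnt := by
            intro p q hm' h1 h2 h3
            rcases List.mem_cons.1 hm' with he' | hm''
            · cases he'; exact hm1eq h3
            · exact le_trans hm1le (I2 p q hm'' h1 h2 h3)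
          have hI3' : ∀ p q, (p, q) ∈ (a :: q3t, b :: q4t) :: seen → p ≠ [] → q ≠ [] →
              k + 1 ≠ 0 := fun _ _ _ _ _ => Nat.succ_ne_zero k
          by_cases hexp : cnt < m1
          · rw [if_pos hexp, if_pos hexp]
            rw [hq []]
            refine ihla (lnext ++ [(q3t, b :: (q4t ++ [a])), (a :: (q3t ++ [b]), q4t)])
              ((a :: q3t, b :: q4t) :: seen)
              (addIfNew (addIfNew nxt (q3t, b :: (q4t ++ [a]))) (a :: (q3t ++ [b]), q4t))
              m1 f fB (by intro h; exact absurd h (Nat.succ_ne_zero k)) hI2' hI3' ?_ ?_ ?_ HFB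
            · intro p pt q qt hm' hlt
              rcases List.mem_cons.1 hm' with he' | hm''
              · cases he'
                exact ⟨mem_addIfNew_of_mem _ (mem_addIfNew_self _ _), mem_addIfNew_self _ _⟩
              · have := I4 p pt q qt hm'' (lt_of_lt_of_le hlt hm1le)
                exact ⟨mem_addIfNew_of_mem _ (mem_addIfNew_of_mem _ this.1),
                  mem_addIfNew_of_mem _ (mem_addIfNew_of_mem _ this.2)⟩
            · rw [show lnext ++ [(q3t, b :: (q4t ++ [a])), (a :: (q3t ++ [b]), q4t)]
                  = (lnext ++ [(q3t, b :: (q4t ++ [a]))]) ++ [(a :: (q3t ++ [b]), q4t)] by simp,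
                ddRel_append_addIfNew, ddRel_append_addIfNew, ← I1]
            · simp only [List.length_append, List.length_cons, List.length_nil]
              rw [Nat.add_mul]
              omega
          · rw [if_neg hexp, if_neg hexp]
            refine ihla lnext ((a :: q3t, b :: q4t) :: seen) nxt m1 f fB
              (by intro h; exact absurd h (Nat.succ_ne_zero k)) hI2' hI3' ?_ I1 (by omega) HFB
            intro p pt q qt hm' hlt
            rcases List.mem_cons.1 hm' with he' | hm''
            · cases he'; exact absurd hlt hexp
            · exact I4 p pt q qt hm'' (lt_of_lt_of_le hlt hm1le)

theorem bfs_spec : Claim_equal_bfs := by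
  intro q1 q2 _
  unfold Spec_bfs bfs bfs_alt
  set n : Nat := q1.length + q2.length with hn
  have h := main n (n + 1) [(q1, q2)] [] [] [] 1000000000 (2 ^ (n + 2)) (n + 2)
    (by omega)
    (by intro q3 q4 h; simp at h)
    (by intro q3 q4 h; simp at h)
    (by intro a q3t b q4t h; simp at h)
    (by simp [ddRel])
    (by simp)
    (by omega)
  have hc : (n : Int) + 1 - ((n + 1 : Nat) : Int) = 0 := by push_cast; ring
  rw [hc] at h
  simp only [List.map_cons, List.map_nil, List.append_nil] at h
  have hdd : ddRel [] [(q1, q2)] = [(q1, q2)] := by simp [ddRel]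
  rw [hdd] at h
  have hlen : ((q1.length : Int) + (q2.length : Int)) = (n : Int) := by push_cast [hn]; ring
  rw [hlen]
  rw [h]
  have hc2 : (n : Int) + 2 - ((n + 1 : Nat) : Int) = 0 + 1 := by push_cast; ring
  rw [hc2]
  show _ = runB (n + 3) [(q1, q2)] (n : Int) 0 1000000000
  rw [show n + 3 = (n + 2) + 1 from rfl, runB_cons]
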